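-- pv_equiv track=rewrite | github.com/MrBrantCode/unitest_baseline | mut_generate/mist_train_cf/cf_92304/solution.py | find_second_highest_prime
-- ===== SOURCE A (Python) =====
-- def find_second_highest_prime(numbers):
--     primes = []
--
--     for num in numbers:
--         if num > 1:
--             is_prime = True
--             for i in range(2, int(num**0.5) + 1):
--                 if num % i == 0:
--                     is_prime = False
--                     break
--             if is_prime:
--                 primes.append(num)
--
--     primes.sort(reverse=True)
--     if len(primes) >= 2:
--         return primes[1]
--     else:
--         return None
-- ===== SOURCE B (Python) =====
-- def find_second_highest_prime(numbers):
--     first = None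
--     second = None
--     for num in numbers:
--         if num > 1:
--             is_prime = True
--             for i in range(2, int(num**0.5) + 1):
--                 if num % i == 0:
--                     is_prime = False
--                     break
--             if is_prime:
--                 if first is None or num > first:
--                     second = first
--                     first = num
--                 elif second is None or num > second:
--                     second = num
--     return second
-- ===== Notes on version B (the rewrite author's own statement) =====
-- stated objective: simpler
-- what changed: Instead of collecting all primes into a list, sorting it descending and indexing the second element, B threads two running variables (highest, second-highest) through a single pass and never builds or sorts a list.
import Mathlib
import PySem

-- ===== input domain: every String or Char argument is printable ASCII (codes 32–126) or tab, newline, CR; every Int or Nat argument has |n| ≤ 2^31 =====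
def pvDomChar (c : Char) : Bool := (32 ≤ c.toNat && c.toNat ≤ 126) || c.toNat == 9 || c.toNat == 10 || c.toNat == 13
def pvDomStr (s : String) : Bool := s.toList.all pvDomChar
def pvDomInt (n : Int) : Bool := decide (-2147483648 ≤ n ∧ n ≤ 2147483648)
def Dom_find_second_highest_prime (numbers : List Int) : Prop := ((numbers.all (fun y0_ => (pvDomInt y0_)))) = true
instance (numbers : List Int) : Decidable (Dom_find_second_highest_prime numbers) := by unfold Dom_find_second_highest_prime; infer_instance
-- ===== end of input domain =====

-- B replaces A's collect-primes / sort-descending / index-[1] pipeline by a single pass that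
-- threads two running variables (highest, second highest); objective: simpler, no list and no sort.


-- ===== PORT A =====
-- trial division `for i in range(2, int(num**0.5)+1): if num % i == 0: …break` — the break only
-- decides the is_prime flag, so the loop is `.all` over the same range; int(num**0.5) = Nat.sqrt
-- exactly on the domain |num| ≤ 2^31 (only reached with num > 1)
def pvIsPrimeA (num : Int) : Bool :=
  (PySem.List.pyRange 2 (((Int.toNat num).sqrt : Int) + 1) 1).all
    (fun i => !(PySem.Int.mod num i == 0))

def find_second_highest_prime (numbers : List Int) : Option Int :=
  let primes := numbers.foldl
    (fun primes num =>
      if num > 1 then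
        if pvIsPrimeA num then primes ++ [num] else primes
      else primes) []
  let sortedPrimes := PySem.List.sorted primes (fun x => x) true
  if 2 ≤ sortedPrimes.length then PySem.List.pyGet? sortedPrimes 1 else none

-- ===== PORT B =====
-- identical trial-division primality test (B keeps A's test)
def pvIsPrimeB (num : Int) : Bool :=
  (PySem.List.pyRange 2 (((Int.toNat num).sqrt : Int) + 1) 1).all
    (fun i => !(PySem.Int.mod num i == 0))

def find_second_highest_prime_alt (numbers : List Int) : Option Int :=
  (numbers.foldl
    (fun (st : Option Int × Option Int) num =>
      if num > 1 then
        if pvIsPrimeB num then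
          if (match st.1 with | none => true | some f => decide (num > f)) then
            (some num, st.1)
          else if (match st.2 with | none => true | some s => decide (num > s)) then
            (st.1, some num)
          else st
        else st
      else st)
    ((none : Option Int), (none : Option Int))).2

-- ===== PRECONDITION & SPEC =====
def Spec_find_second_highest_prime (numbers : List Int) (out : Option Int) : Prop := out = find_second_highest_prime_alt numbers
instance (numbers : List Int) (out : Option Int) : Decidable (Spec_find_second_highest_prime numbers out) := by unfold Spec_find_second_highest_prime; infer_instance

-- ===== CLAIM (what is proved, stated in full; the proofs are below) =====
def Claim_equal_find_second_highest_prime : Prop := ∀ (numbers : List Int), Dom_find_second_highest_prime numbers → Spec_find_second_highest_prime numbers (find_second_highest_prime numbers)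

-- ===== LEMMAS AND PROOFS =====

-- B's state update on a prime, extracted
def pvStep (st : Option Int × Option Int) (num : Int) : Option Int × Option Int :=
  if (match st.1 with | none => true | some f => decide (num > f)) then
    (some num, st.1)
  else if (match st.2 with | none => true | some s => decide (num > s)) then
    (st.1, some num)
  else st

-- descending insertion (proof device to name sorted(·, reverse=True) of an appended element)
def pvInsertDesc (p : Int) : List Int → List Int
  | [] => [p]
  | x :: xs => if p > x then p :: x :: xs else x :: pvInsertDesc p xs

def pvPred (num : Int) : Bool := decide (num > 1) && pvIsPrimeA num

lemma pvIsPrimeB_eq : pvIsPrimeB = pvIsPrimeA := rfl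

lemma pvA_primes (numbers : List Int) :
    numbers.foldl
      (fun primes num =>
        if num > 1 then
          if pvIsPrimeA num then primes ++ [num] else primes
        else primes) [] = numbers.filter pvPred := by
  have h : (fun (primes : List Int) num =>
      if num > 1 then
        if pvIsPrimeA num then primes ++ [num] else primes
      else primes)
      = fun primes num => if pvPred num = true then primes ++ [(fun x => x) num] else primes := by
    funext primes num
    by_cases h1 : num > 1 <;> by_cases h2 : pvIsPrimeA num <;> simp [pvPred, h1, h2]
  rw [h, PySem.List.foldl_append_if pvPred (fun x => x) numbers []]
  simp

lemma pvB_fold (l : List Int) (st : Option Int × Option Int) :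
    l.foldl
      (fun (st : Option Int × Option Int) num =>
        if num > 1 then
          if pvIsPrimeB num then
            if (match st.1 with | none => true | some f => decide (num > f)) then
              (some num, st.1)
            else if (match st.2 with | none => true | some s => decide (num > s)) then
              (st.1, some num)
            else st
          else st
        else st) st
    = (l.filter pvPred).foldl pvStep st := by
  have hbody : ∀ (st : Option Int × Option Int) (num : Int),
      (if num > 1 then
          if pvIsPrimeB num then
            if (match st.1 with | none => true | some f => decide (num > f)) then
              ((some num, st.1) : Option Int × Option Int)
            else if (match st.2 with | none => true | some s => decide (num > s)) then
              (st.1, some num)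
            else st
          else st
        else st)
      = if pvPred num then pvStep st num else st := by
    intro st num
    by_cases h1 : num > 1 <;> by_cases h2 : pvIsPrimeA num <;>
      simp [pvPred, pvIsPrimeB_eq, pvStep, h1, h2]
  induction l generalizing st with
  | nil => rfl
  | cons a l ih =>
    rw [List.foldl_cons, List.filter_cons, hbody]
    by_cases hp : pvPred a
    · rw [if_pos hp, if_pos hp, List.foldl_cons]
      exact ih _
    · rw [if_neg hp, if_neg hp]
      exact ih _

lemma pvInsertDesc_perm (p : Int) (s : List Int) : (pvInsertDesc p s).Perm (p :: s) := by
  induction s with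
  | nil => simp [pvInsertDesc]
  | cons x xs ih =>
    by_cases h : p > x
    · simp [pvInsertDesc, h]
    · simp only [pvInsertDesc, if_neg h]
      exact (ih.cons x).trans (List.Perm.swap p x xs)

lemma pvMem_insertDesc {y p : Int} {s : List Int} (h : y ∈ pvInsertDesc p s) :
    y = p ∨ y ∈ s := by
  have := (pvInsertDesc_perm p s).mem_iff.mp h
  simpa using this

lemma pvInsertDesc_pairwise (p : Int) {s : List Int}
    (h : s.Pairwise (fun a b => b ≤ a)) :
    (pvInsertDesc p s).Pairwise (fun a b => b ≤ a) := by
  induction s with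
  | nil => simp [pvInsertDesc]
  | cons x xs ih =>
    rcases List.pairwise_cons.mp h with ⟨hx, hxs⟩
    simp only [pvInsertDesc]
    by_cases hc : p > x
    · rw [if_pos hc]
      refine List.pairwise_cons.mpr ⟨?_, List.pairwise_cons.mpr ⟨hx, hxs⟩⟩
      intro y hy
      rcases List.mem_cons.mp hy with rfl | hy
      · omega
      · have := hx _ hy; omega
    · rw [if_neg hc]
      refine List.pairwise_cons.mpr ⟨?_, ih hxs⟩
      intro y hy
      rcases pvMem_insertDesc hy with rfl | hy
      · omega
      · exact hx _ hy

lemma pvSorted_append (l : List Int) (p : Int) :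
    PySem.List.sorted (l ++ [p]) (fun x => x) true
      = pvInsertDesc p (PySem.List.sorted l (fun x => x) true) := by
  apply List.Perm.eq_of_pairwise (le := fun a b : Int => b ≤ a)
  · intro a b _ _ h1 h2; omega
  · exact PySem.List.sorted_pairwise_rev _ _
  · exact pvInsertDesc_pairwise p (PySem.List.sorted_pairwise_rev _ _)
  · exact (PySem.List.sorted_perm _ _ _).trans
      ((List.perm_append_singleton p l).trans
        (((PySem.List.sorted_perm l (fun x => x) true).symm.cons p).trans
          (pvInsertDesc_perm p _).symm))

lemma pvStep_top2 (s : List Int) (p : Int) :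
    pvStep (s[0]?, s[1]?) p = ((pvInsertDesc p s)[0]?, (pvInsertDesc p s)[1]?) := by
  match s with
  | [] => simp [pvStep, pvInsertDesc]
  | [x] =>
    by_cases h : p > x <;> simp [pvStep, pvInsertDesc, h]
  | x :: y :: ys =>
    by_cases h1 : p > x <;> by_cases h2 : p > y <;>
      simp [pvStep, pvInsertDesc, h1, h2]

lemma pvFold_top2 (l : List Int) :
    l.foldl pvStep ((none : Option Int), (none : Option Int))
      = ((PySem.List.sorted l (fun x => x) true)[0]?,
         (PySem.List.sorted l (fun x => x) true)[1]?) := by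
  induction l using List.reverseRecOn with
  | nil => rfl
  | append_singleton l p ih =>
    rw [List.foldl_append, ih]
    simp only [List.foldl]
    rw [pvStep_top2, pvSorted_append]

lemma pvA_index (s : List Int) :
    (if 2 ≤ s.length then PySem.List.pyGet? s 1 else none) = s[1]? := by
  by_cases h : 2 ≤ s.length
  · rw [if_pos h, show (1 : Int) = ((1 : Nat) : Int) from rfl,
      PySem.List.pyGet?_ofNat s 1 (by omega)]
    rw [List.getElem?_eq_getElem (by omega)]
  · rw [if_neg h, List.getElem?_eq_none (by omega)]

-- ===== VERDICT (by name: the statement is the Claim_ definition above) =====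
theorem find_second_highest_prime_spec : Claim_equal_find_second_highest_prime := by
  intro numbers _
  unfold Spec_find_second_highest_prime
  unfold find_second_highest_prime find_second_highest_prime_alt
  rw [pvA_primes, pvB_fold, pvFold_top2, pvA_index]
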